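-- pv_equiv track=rewrite | github.com/xaviave/anonymisation_script | script_anonymize/sql_parse.py | change_to_dict
-- ===== SOURCE A (Python) =====
-- import copy
--
-- def change_to_dict(dic, schema):
--     c = copy.deepcopy({k: v for k, v in schema.items() if k in dic})
--     change = {}
--     for k, v in c.items():
--         tmp_c = {}
--         for it in v.keys():
--             for tmp in dic[k]:
--                 static_f = len(tmp)
--                 if '=' in tmp:
--                     static_f = tmp.find('=')
--                 if v[it] == tmp[:static_f]:
--                     tmp_c[it] = tmp
--         if len(tmp_c) > 0:
--             change[k] = tmp_c
--     return change
-- ===== SOURCE B (Python) =====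
-- def change_to_dict(dic, schema):
--     change = {}
--     for k, v in schema.items():
--         if k not in dic:
--             continue
--         # index the entries once: prefix (text before '=' if any) -> last entry with it
--         last = {}
--         for tmp in dic[k]:
--             pos = tmp.find('=')
--             last[tmp if pos < 0 else tmp[:pos]] = tmp
--         tmp_c = {it: last[val] for it, val in v.items() if val in last}
--         if tmp_c:
--             change[k] = tmp_c
--     return change
-- ===== Notes on version B (the rewrite author's own statement) =====
-- stated objective: faster
-- what changed: Instead of rescanning all of dic[k] for every schema field (and recomputing each entry's '='-prefix each time), B builds a prefix->last-entry dict once per key and answers each field with a single hash lookup.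
import Mathlib
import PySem

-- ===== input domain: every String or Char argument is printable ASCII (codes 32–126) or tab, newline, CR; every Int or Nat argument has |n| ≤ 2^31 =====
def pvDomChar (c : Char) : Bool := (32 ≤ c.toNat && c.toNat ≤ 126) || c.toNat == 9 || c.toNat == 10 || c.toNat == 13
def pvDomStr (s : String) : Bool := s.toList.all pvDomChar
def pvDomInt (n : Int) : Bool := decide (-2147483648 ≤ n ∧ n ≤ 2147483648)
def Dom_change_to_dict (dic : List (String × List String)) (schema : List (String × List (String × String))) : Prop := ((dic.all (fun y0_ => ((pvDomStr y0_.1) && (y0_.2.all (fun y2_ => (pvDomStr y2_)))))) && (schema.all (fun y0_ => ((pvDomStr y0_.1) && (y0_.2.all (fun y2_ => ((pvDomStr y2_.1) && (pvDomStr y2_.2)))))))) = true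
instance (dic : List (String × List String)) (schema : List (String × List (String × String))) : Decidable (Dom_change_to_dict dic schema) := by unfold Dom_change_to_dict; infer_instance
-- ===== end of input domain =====

-- B replaces A's inner entries-scan per schema field by a prefix→entry dict built once per key, one O(1) lookup per field.
-- Return-value equivalence only; neither program mutates its arguments.

-- ===== PORT A =====
def change_to_dict (dic : List (String × List String)) (schema : List (String × List (String × String))) : List (String × List (String × String)) :=
  let dicD := PySem.Dict.mk dic
  -- c = deepcopy({k: v for k, v in schema.items() if k in dic}); deepcopy is the identity on these immutable-valued data
  let c := schema.filter (fun kv => PySem.Dict.contains dicD kv.1)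
  let change := c.foldl (fun change kv =>
      let v := PySem.Dict.mk kv.2
      let tmp_c := (PySem.Dict.keys v).foldl (fun tmp_c it =>
          ((PySem.Dict.get? dicD kv.1).getD []).foldl (fun tmp_c tmp =>
              let static_f : Int := if PySem.Str.isIn "=" tmp then PySem.Str.find tmp "=" else (PySem.Str.len tmp : Int)
              if (PySem.Dict.get? v it).getD "" = PySem.Str.slice tmp none (some static_f)
              then PySem.Dict.insert tmp_c it tmp else tmp_c)
            tmp_c)
        (PySem.Dict.empty : PySem.Dict String String)
      if 0 < PySem.Dict.size tmp_c then PySem.Dict.insert change kv.1 (PySem.Dict.items tmp_c) else change)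
    (PySem.Dict.empty : PySem.Dict String (List (String × String)))
  PySem.Dict.items change

-- ===== PORT B =====
-- B's prefix of an entry: the text before '=' if present, else the whole entry
def pvBKey (tmp : String) : String :=
  let pos := PySem.Str.find tmp "="
  if pos < 0 then tmp else PySem.Str.slice tmp none (some pos)

def change_to_dict_alt (dic : List (String × List String)) (schema : List (String × List (String × String))) : List (String × List (String × String)) :=
  let dicD := PySem.Dict.mk dic
  let change := schema.foldl (fun change kv =>
      match PySem.Dict.get? dicD kv.1 with
      | none => change
      | some entries =>
          let last := entries.foldl (fun last tmp => PySem.Dict.insert last (pvBKey tmp) tmp)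
            (PySem.Dict.empty : PySem.Dict String String)
          let tmp_c := kv.2.foldl (fun tc p =>
              match PySem.Dict.get? last p.2 with
              | some t => PySem.Dict.insert tc p.1 t
              | none => tc)
            (PySem.Dict.empty : PySem.Dict String String)
          if 0 < PySem.Dict.size tmp_c then PySem.Dict.insert change kv.1 (PySem.Dict.items tmp_c) else change)
    (PySem.Dict.empty : PySem.Dict String (List (String × String)))
  PySem.Dict.items change

-- ===== PRECONDITION & SPEC =====
-- Pre_ only imposes the Python-dict representation invariant: no duplicate keys in any of the
-- association lists standing for dicts (dic, schema, and each schema value); every real Python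
-- dict satisfies it, so it excludes no state a run of the Python programs can be in.
def Pre_change_to_dict (dic : List (String × List String)) (schema : List (String × List (String × String))) : Prop :=
  (dic.map Prod.fst).Nodup ∧ (schema.map Prod.fst).Nodup ∧ ∀ p ∈ schema, (p.2.map Prod.fst).Nodup
instance (dic : List (String × List String)) (schema : List (String × List (String × String))) : Decidable (Pre_change_to_dict dic schema) := by unfold Pre_change_to_dict; infer_instance

def pvWitness_change_to_dict : (List (String × List String)) × (List (String × List (String × String))) :=
  ([("t", ["id=7", "name"])], [("t", [("f1", "id"), ("f2", "name")]), ("u", [("f3", "x")])])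

def Spec_change_to_dict (dic : List (String × List String)) (schema : List (String × List (String × String))) (out : List (String × List (String × String))) : Prop := out = change_to_dict_alt dic schema
instance (dic : List (String × List String)) (schema : List (String × List (String × String))) (out : List (String × List (String × String))) : Decidable (Spec_change_to_dict dic schema out) := by unfold Spec_change_to_dict; infer_instance

-- ===== CLAIM (what is proved, stated in full; the proofs are below) =====
def Claim_equal_change_to_dict : Prop := ∀ (dic : List (String × List String)) (schema : List (String × List (String × String))), Dom_change_to_dict dic schema → Pre_change_to_dict dic schema → Spec_change_to_dict dic schema (change_to_dict dic schema)

-- ===== LEMMAS AND PROOFS =====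

-- A's slice bound (find position if '=' occurs, else the length) cuts off exactly B's pvBKey
lemma pvSlice_len (s : String) : PySem.Str.slice s none (some (PySem.Str.len s : Int)) = s := by
  rw [show (PySem.Str.len s : Int) = ((s.toList.length : Nat) : Int) by simp [PySem.Str.len]]
  conv_rhs => rw [← (show String.ofList s.toList = s by simp [String.ofList])]
  simp [PySem.Str.slice, PySem.Chars.slice_eq_listSlice, PySem.List.slice_to_natCast]
  rw [show s.length = s.toList.length from rfl, List.take_length]
  simp [String.ofList]

lemma pvPrefix_eq (tmp : String) :
    PySem.Str.slice tmp none (some (if PySem.Str.isIn "=" tmp then PySem.Str.find tmp "=" else (PySem.Str.len tmp : Int))) = pvBKey tmp := by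
  unfold pvBKey
  by_cases h : PySem.Str.isIn "=" tmp = true
  · have h0 : (0:Int) ≤ PySem.Str.find tmp "=" := by
      rw [PySem.Str.find_nonneg_iff]; rw [PySem.Str.isIn_iff_infix] at h; exact h
    simp only [h, if_true, if_neg (not_lt.mpr h0)]
  · have h1 : PySem.Str.find tmp "=" = -1 := by
      rw [PySem.Str.find_eq_neg_one_iff]; rw [← PySem.Str.isIn_iff_infix]; simpa using h
    simp only [eq_false_of_ne_true h, h1]
    rw [if_neg (by simp), if_pos (by norm_num : (-1:Int) < 0)]
    exact pvSlice_len tmp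

-- looking up the prefix-indexed dict B builds = the LAST entry whose prefix matches
lemma pvGet_build_last (entries : List String) (m : PySem.Dict String String) (val : String) :
    PySem.Dict.get? (entries.foldl (fun m t => PySem.Dict.insert m (pvBKey t) t) m) val
      = (match entries.reverse.find? (fun t => pvBKey t == val) with
         | some t => some t
         | none => PySem.Dict.get? m val) := by
  induction entries generalizing m with
  | nil => simp
  | cons h t ih =>
      simp only [List.foldl_cons, List.reverse_cons, List.find?_append, ih]
      cases hf : t.reverse.find? (fun t => pvBKey t == val) with
      | some u => simp
      | none =>
          simp only [Option.none_or]
          rw [PySem.Dict.get?_insert]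
          by_cases hv : val = pvBKey h
          · simp [hv, List.find?]
          · rw [if_neg hv]
            simp only [List.find?, show (pvBKey h == val) = false by simp [Ne.symm hv]]

-- A's inner scan over the entries for one field = insert the LAST matching entry (if any)
lemma pvFoldl_insert_if (entries : List String) (d : PySem.Dict String String) (it val : String) :
    entries.foldl (fun d tmp => if val = pvBKey tmp then PySem.Dict.insert d it tmp else d) d
      = (match entries.reverse.find? (fun t => pvBKey t == val) with
         | some t => PySem.Dict.insert d it t
         | none => d) := by
  induction entries generalizing d with
  | nil => simp
  | cons h t ih =>
      simp only [List.foldl_cons, List.reverse_cons, List.find?_append, ih]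
      cases hf : t.reverse.find? (fun t => pvBKey t == val) with
      | some u =>
          by_cases hv : val = pvBKey h
          · simp [hv, PySem.Dict.insert_insert_self]
          · simp [hv]
      | none =>
          simp only [Option.none_or]
          by_cases hv : val = pvBKey h
          · simp [hv, List.find?]
          · rw [if_neg hv]
            simp only [List.find?, show (pvBKey h == val) = false by simp [Ne.symm hv]]

-- for one schema key: A's nested scans and B's index-then-lookup build the same tmp_c dict
lemma pvTmpc_eq (entries : List String) (v : List (String × String)) (hnd : (v.map Prod.fst).Nodup) :
    (PySem.Dict.keys (PySem.Dict.mk v)).foldl (fun tmp_c it =>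
        entries.foldl (fun tmp_c tmp =>
            if (PySem.Dict.get? (PySem.Dict.mk v) it).getD "" =
                PySem.Str.slice tmp none (some (if PySem.Str.isIn "=" tmp then PySem.Str.find tmp "=" else (PySem.Str.len tmp : Int)))
            then PySem.Dict.insert tmp_c it tmp else tmp_c)
          tmp_c)
      (PySem.Dict.empty : PySem.Dict String String)
    = v.foldl (fun tc p =>
        match PySem.Dict.get? (entries.foldl (fun last tmp => PySem.Dict.insert last (pvBKey tmp) tmp)
                  (PySem.Dict.empty : PySem.Dict String String)) p.2 with
        | some t => PySem.Dict.insert tc p.1 t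
        | none => tc)
      (PySem.Dict.empty : PySem.Dict String String) := by
  rw [show PySem.Dict.keys (PySem.Dict.mk v) = v.map Prod.fst from rfl, List.foldl_map]
  apply PySem.List.foldl_congr_mem'
  intro p hp tc
  have hget : PySem.Dict.get? (PySem.Dict.mk v) p.1 = some p.2 :=
    PySem.Dict.get?_of_mem_items _ hp hnd
  simp only [hget, Option.getD_some]
  rw [PySem.List.foldl_congr_mem' entries _
        (fun tc tmp => if p.2 = pvBKey tmp then PySem.Dict.insert tc p.1 tmp else tc) tc
        (by intro x _ acc; rw [pvPrefix_eq]),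
      pvFoldl_insert_if, pvGet_build_last]
  cases hf : entries.reverse.find? (fun t => pvBKey t == p.2) <;> simp

-- ===== VERDICT (by name: the statement is the Claim_ definition above) =====
theorem change_to_dict_spec : Claim_equal_change_to_dict := by
  intro dic schema _hdom hpre
  obtain ⟨_hd, _hs, hinner⟩ := hpre
  unfold Spec_change_to_dict change_to_dict change_to_dict_alt
  simp only []
  rw [← PySem.List.foldl_if_eq_foldl_filter]
  congr 1
  apply PySem.List.foldl_congr_mem'
  intro kv hkv acc
  rw [PySem.Dict.contains_eq_isSome_get?]
  cases hk : PySem.Dict.get? (PySem.Dict.mk dic) kv.1 with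
  | none => simp
  | some entries =>
      simp only [Option.isSome_some, if_true, Option.getD_some]
      rw [pvTmpc_eq entries kv.2 (hinner kv hkv)]
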